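-- pv_equiv track=rewrite | github.com/AlexanderGaliano18/inchiralGalianoEC1 | app.py | analizar_centros_existentes
-- ===== SOURCE A (Python) =====
-- def analizar_centros_existentes(smiles: str):
--     centros_especificados = 0
--     posiciones_at = []
--     i = 0
--
--     while i < len(smiles):
--         if smiles[i] == "@":
--             if i + 1 < len(smiles) and smiles[i+1] == "@":
--                 centros_especificados += 1
--                 posiciones_at.append(i)
--                 i += 2
--             else:
--                 centros_especificados += 1
--                 posiciones_at.append(i)
--                 i += 1
--         else:
--             i += 1
--
--     return centros_especificados, posiciones_at
-- ===== SOURCE B (Python) =====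
-- import re
--
-- def analizar_centros_existentes(smiles: str):
--     # Greedy @@-pairing per maximal run of '@': a run of k consecutive '@'s
--     # yields ceil(k/2) markers at its start, start+2, start+4, ...
--     posiciones_at = []
--     for m in re.finditer(r'@+', smiles):
--         k = m.end() - m.start()
--         posiciones_at.extend(range(m.start(), m.start() + 2 * ((k + 1) // 2), 2))
--     return len(posiciones_at), posiciones_at
-- ===== Notes on version B (the rewrite author's own statement) =====
-- stated objective: faster
-- what changed: B replaces A's per-character index-cursor scan with i+=1/i+=2 skip logic by one regex pass over maximal '@' runs, deriving the ceil(k/2) marker positions of each run arithmetically.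
import Mathlib
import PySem

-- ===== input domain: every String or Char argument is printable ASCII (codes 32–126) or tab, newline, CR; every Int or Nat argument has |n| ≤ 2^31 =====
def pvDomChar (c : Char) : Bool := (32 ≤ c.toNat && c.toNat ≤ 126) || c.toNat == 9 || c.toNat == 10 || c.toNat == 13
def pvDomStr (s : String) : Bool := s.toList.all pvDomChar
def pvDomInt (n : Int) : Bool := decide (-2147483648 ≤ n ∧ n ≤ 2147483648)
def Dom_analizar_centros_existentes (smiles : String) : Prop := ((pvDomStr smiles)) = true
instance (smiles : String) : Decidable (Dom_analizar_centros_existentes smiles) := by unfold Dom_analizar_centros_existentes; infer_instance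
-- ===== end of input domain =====

-- B replaces A's index-cursor scan (with its i+=1/i+=2 skip logic) by a regex pass over
-- maximal '@' runs, deriving the ceil(k/2) marker positions of each run arithmetically (idiomatic).


-- ===== PORT A =====
-- A's while loop over the string with cursor i; step for step.
def pvAuxA : List Char → Int → Int × List Int
  | [], _ => (0, [])
  | c :: rest, i =>
    if c = '@' then
      match rest with
      | c2 :: rest2 =>
        if c2 = '@' then
          let r := pvAuxA rest2 (i + 2)
          (r.1 + 1, i :: r.2)
        else
          let r := pvAuxA (c2 :: rest2) (i + 1)
          (r.1 + 1, i :: r.2)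
      | [] => (1, [i])
    else pvAuxA rest (i + 1)

def analizar_centros_existentes (smiles : String) : Int × List Int :=
  pvAuxA smiles.toList 0

-- ===== PORT B =====
-- re.finditer(r'@+', smiles): the (start, length) of every maximal run of '@'.
def pvRuns : List Char → Nat → List (Nat × Nat)
  | [], _ => []
  | c :: rest, i =>
    if c = '@' then
      let t := rest.takeWhile (· = '@')
      (i, t.length + 1) :: pvRuns (rest.drop t.length) (i + t.length + 1)
    else pvRuns rest (i + 1)
termination_by cs _ => cs.length
decreasing_by
  · have := (List.takeWhile_sublist (l := rest) (p := fun x => decide (x = '@'))).length_le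
    simp only [List.length_drop, List.length_cons]
    omega
  · simp

-- range(m.start(), m.start() + 2*((k+1)//2), 2)
def pvRunPos (s k : Nat) : List Int :=
  (List.range ((k + 1) / 2)).map (fun (j : Nat) => (s : Int) + 2 * (j : Int))

def analizar_centros_existentes_alt (smiles : String) : Int × List Int :=
  let pos := (pvRuns smiles.toList 0).flatMap (fun r => pvRunPos r.1 r.2)
  ((pos.length : Int), pos)

-- ===== PRECONDITION & SPEC =====
def Spec_analizar_centros_existentes (smiles : String) (out : Int × List Int) : Prop := out = analizar_centros_existentes_alt smiles
instance (smiles : String) (out : Int × List Int) : Decidable (Spec_analizar_centros_existentes smiles out) := by unfold Spec_analizar_centros_existentes; infer_instance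

-- ===== CLAIM (what is proved, stated in full; the proofs are below) =====
def Claim_equal_analizar_centros_existentes : Prop := ∀ (smiles : String), Dom_analizar_centros_existentes smiles → Spec_analizar_centros_existentes smiles (analizar_centros_existentes smiles)

-- ===== LEMMAS AND PROOFS =====

-- takeWhile over a replicate-prefixed list whose suffix does not start with '@'
theorem pv_takeWhile_run (m : Nat) (rest : List Char)
    (h : ∀ c, rest.head? = some c → c ≠ '@') :
    (List.replicate m '@' ++ rest).takeWhile (· = '@') = List.replicate m '@' := by
  induction m with
  | zero =>
    cases rest with
    | nil => simp
    | cons c cs =>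
      have := h c rfl
      simp [this]
  | succ n ih => simpa [List.replicate_succ, List.takeWhile] using ih

theorem pv_runPos_succ_succ (i k : Nat) :
    pvRunPos i (k + 2) = (i : Int) :: pvRunPos (i + 2) k := by
  unfold pvRunPos
  have : (k + 2 + 1) / 2 = (k + 1) / 2 + 1 := by omega
  rw [this, List.range_succ_eq_map, List.map_cons, List.map_map]
  refine congrArg₂ List.cons (by simp) ?_
  apply List.map_congr_left
  intro j _
  simp only [Function.comp_apply]
  push_cast
  ring

theorem pv_runPos_length (s k : Nat) : (pvRunPos s k).length = (k + 1) / 2 := by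
  simp [pvRunPos]

-- A on a full run of k '@'s followed by a non-'@' suffix
theorem pv_auxA_run (k : Nat) (rest : List Char) (i : Nat)
    (h : ∀ c, rest.head? = some c → c ≠ '@') :
    pvAuxA (List.replicate k '@' ++ rest) (i : Int)
      = ((((k + 1) / 2 : Nat) : Int) + (pvAuxA rest ((i + k : Nat) : Int)).1,
         pvRunPos i k ++ (pvAuxA rest ((i + k : Nat) : Int)).2) := by
  induction k using Nat.strong_induction_on generalizing i with
  | _ k ih =>
  match k with
  | 0 => simp [pvRunPos]
  | 1 =>
    cases rest with
    | nil => simp [pvAuxA, pvRunPos]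
    | cons c cs =>
      have hc := h c rfl
      have hcast : ((i : Int) + 1) = ((i + 1 : Nat) : Int) := by push_cast; ring
      have hstep :
          pvAuxA (List.replicate 1 '@' ++ (c :: cs)) (i : Int)
            = ((pvAuxA (c :: cs) ((i : Int) + 1)).1 + 1,
               (i : Int) :: (pvAuxA (c :: cs) ((i : Int) + 1)).2) := by
        simp only [List.replicate_succ, List.replicate_zero, List.nil_append, List.cons_append]
        simp [pvAuxA, hc]
      rw [hstep, hcast]
      simp only [pvRunPos, Prod.mk.injEq]
      refine ⟨by norm_num; omega, by norm_num⟩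
  | (m + 2) =>
    have hrw : List.replicate (m + 2) '@' ++ rest
        = '@' :: '@' :: (List.replicate m '@' ++ rest) := by
      simp [List.replicate_succ]
    rw [hrw]
    simp only [pvAuxA, ite_true]
    have ihm := ih m (by omega) (i + 2)
    have hcast : ((i : Int) + 2) = ((i + 2 : Nat) : Int) := by push_cast; ring
    rw [hcast, ihm, pv_runPos_succ_succ]
    have h1 : (m + 2 + 1) / 2 = (m + 1) / 2 + 1 := by omega
    have h2 : (i + 2 + m) = (i + (m + 2)) := by omega
    rw [h2]
    simp only [Prod.mk.injEq, List.cons_append]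
    exact ⟨by push_cast [h1]; ring, trivial⟩

-- B's run finder on the same decomposition
theorem pv_runs_run (k : Nat) (rest : List Char) (i : Nat) (hk : 1 ≤ k)
    (h : ∀ c, rest.head? = some c → c ≠ '@') :
    pvRuns (List.replicate k '@' ++ rest) i = (i, k) :: pvRuns rest (i + k) := by
  obtain ⟨m, rfl⟩ : ∃ m, k = m + 1 := ⟨k - 1, by omega⟩
  have hrw : List.replicate (m + 1) '@' ++ rest = '@' :: (List.replicate m '@' ++ rest) := by
    simp [List.replicate_succ]
  rw [hrw]
  rw [pvRuns]
  have hdrop : (List.replicate m '@' ++ rest).drop m = rest := by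
    simpa using List.drop_left (List.replicate m '@') rest
  simp only [ite_true, pv_takeWhile_run m rest h, List.length_replicate, hdrop]
  simp [Nat.add_assoc]

-- every list splits as its leading '@'-run plus a non-'@'-headed suffix
theorem pv_split (cs : List Char) :
    cs = List.replicate (cs.takeWhile (· = '@')).length '@' ++ cs.dropWhile (· = '@')
    ∧ (∀ c, (cs.dropWhile (· = '@')).head? = some c → c ≠ '@') := by
  constructor
  · conv_lhs => rw [← List.takeWhile_append_dropWhile (p := (· = '@')) (l := cs)]
    congr 1
    apply List.eq_replicate_of_mem
    intro b hb
    have := List.mem_takeWhile_imp hb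
    simpa using this
  · intro c hc
    have := List.head?_dropWhile_not (p := (· = '@')) (l := cs)
    rw [hc] at this
    simpa using this

-- main loop equivalence
theorem pv_main (cs : List Char) (i : Nat) :
    pvAuxA cs (i : Int)
      = ((((pvRuns cs i).flatMap (fun r => pvRunPos r.1 r.2)).length : Int),
          (pvRuns cs i).flatMap (fun r => pvRunPos r.1 r.2)) := by
  induction hn : cs.length using Nat.strong_induction_on generalizing cs i with
  | _ n ih =>
  cases cs with
  | nil => simp [pvAuxA, pvRuns]
  | cons c rest =>
    by_cases hc : c = '@'
    · subst hc
      obtain ⟨hsplit, hhead⟩ := pv_split ('@' :: rest)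
      set k := (('@' :: rest).takeWhile (· = '@')).length with hk
      set tl := ('@' :: rest).dropWhile (· = '@') with htl
      have hk1 : 1 ≤ k := by
        rw [hk]; simp [List.takeWhile]
      have hlen : tl.length < n := by
        have h1 := congrArg List.length hsplit
        simp only [List.length_cons, List.length_append, List.length_replicate] at h1
        have hn' : rest.length + 1 = n := by simpa using hn
        omega
      rw [hsplit, pv_auxA_run k tl i hhead, pv_runs_run k tl i hk1 hhead]
      have ihtl := ih tl.length (by omega) tl (i + k) rfl
      rw [ihtl]
      simp only [List.flatMap_cons, List.length_append, pv_runPos_length, Prod.mk.injEq]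
      exact ⟨by push_cast; ring, by trivial⟩
    · have hA : pvAuxA (c :: rest) (i : Int) = pvAuxA rest ((i : Int) + 1) := by
        cases rest with
        | nil => simp [pvAuxA, hc]
        | cons d ds => simp [pvAuxA, hc]
      have hB : pvRuns (c :: rest) i = pvRuns rest (i + 1) := by
        rw [pvRuns]; simp [hc]
      have hcast : ((i : Int) + 1) = ((i + 1 : Nat) : Int) := by push_cast; ring
      rw [hA, hB, hcast, ih rest.length (by subst hn; simp) rest (i + 1) rfl]

-- ===== VERDICT (by name: the statement is the Claim_ definition above) =====
theorem analizar_centros_existentes_spec : Claim_equal_analizar_centros_existentes := by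
  intro smiles _
  unfold Spec_analizar_centros_existentes analizar_centros_existentes analizar_centros_existentes_alt
  have := pv_main smiles.toList 0
  simpa using this
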